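-- pv_equiv track=rewrite | github.com/luckyjoy/firmware_monitor | firmware_monitor_ok.py | evaluate_scenario
-- ===== SOURCE A (Python) =====
-- def evaluate_metric(metric_name, values, thresholds):
--     """Evaluate PASS/FAIL/SKIP for a given metric based on thresholds."""
--     if not values or "avg" not in values:
--         return "SKIP"
--     avg_val = values["avg"]
--     if metric_name in thresholds:
--         if avg_val <= thresholds[metric_name]:
--             return "PASS"
--         else:
--             return "FAIL"
--     return "SKIP"
--
-- def evaluate_scenario(scenario_data, thresholds):
--     """Evaluate metrics for one scenario and determine overall scenario status."""
--     results = {}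
--     scenario_status = "PASS"
--     found_skip, found_fail = False, False
--
--     for metric, values in scenario_data["metrics"].items():
--         status = evaluate_metric(metric, values, thresholds)
--         results[metric] = status
--         if status == "FAIL":
--             scenario_status = "FAIL"
--             found_fail = True
--         elif status == "SKIP":
--             found_skip = True
--
--     # Mixed if PASS + SKIP but no FAIL
--     if not found_fail and found_skip and scenario_status == "PASS":
--         scenario_status = "MIXED"
--
--     # If all skipped
--     if all(v == "SKIP" for v in results.values()):
--         scenario_status = "SKIP"
--
--     return results, scenario_status
-- ===== SOURCE B (Python) =====
-- def evaluate_metric(metric_name, values, thresholds):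
--     """Evaluate PASS/FAIL/SKIP for a given metric based on thresholds."""
--     if not values or "avg" not in values:
--         return "SKIP"
--     avg_val = values["avg"]
--     if metric_name in thresholds:
--         if avg_val <= thresholds[metric_name]:
--             return "PASS"
--         else:
--             return "FAIL"
--     return "SKIP"
--
-- def _join(a, s):
--     """Join in the status semilattice: FAIL absorbs, unequal non-FAIL mix to MIXED."""
--     if a is None:
--         return s
--     if a == "FAIL" or s == "FAIL":
--         return "FAIL"
--     if a != s:
--         return "MIXED"
--     return a
--
-- def evaluate_scenario(scenario_data, thresholds):
--     """Evaluate metrics for one scenario; overall status is the semilattice join of the per-metric statuses."""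
--     results = {}
--     acc = None
--     for metric, values in scenario_data["metrics"].items():
--         status = evaluate_metric(metric, values, thresholds)
--         results[metric] = status
--         acc = _join(acc, status)
--     return results, ("SKIP" if acc is None else acc)
-- ===== Notes on version B (the rewrite author's own statement) =====
-- stated objective: alternative
-- what changed: B aggregates the overall status as a single semilattice-join fold over the per-metric statuses (FAIL absorbs, unequal non-FAIL statuses join to MIXED, empty joins to SKIP), replacing A's found_fail/found_skip flags and its two post-hoc corrections (the MIXED rewrite and the all-SKIP scan over the finished dict).
import Mathlib
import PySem

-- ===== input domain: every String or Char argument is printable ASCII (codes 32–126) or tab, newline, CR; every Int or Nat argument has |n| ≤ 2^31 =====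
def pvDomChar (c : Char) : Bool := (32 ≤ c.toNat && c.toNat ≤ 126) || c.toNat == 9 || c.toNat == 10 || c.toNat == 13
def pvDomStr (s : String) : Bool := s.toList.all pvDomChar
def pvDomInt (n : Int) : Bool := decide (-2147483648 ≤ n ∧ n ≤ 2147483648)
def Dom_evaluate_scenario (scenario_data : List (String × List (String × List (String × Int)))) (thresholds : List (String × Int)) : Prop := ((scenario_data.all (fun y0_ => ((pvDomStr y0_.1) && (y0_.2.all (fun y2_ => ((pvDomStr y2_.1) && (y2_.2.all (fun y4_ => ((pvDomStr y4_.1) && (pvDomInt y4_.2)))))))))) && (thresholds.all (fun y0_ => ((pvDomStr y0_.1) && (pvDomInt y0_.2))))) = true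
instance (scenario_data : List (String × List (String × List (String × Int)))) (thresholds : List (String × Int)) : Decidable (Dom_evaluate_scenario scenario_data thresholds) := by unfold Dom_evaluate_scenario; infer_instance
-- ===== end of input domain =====

-- B aggregates the overall status as one semilattice-join fold over the per-metric statuses,
-- replacing A's flags and two post-hoc corrections (alternative decomposition, same cost).


-- ===== PORT A =====
-- shared module helper, used verbatim by both A and B.
-- 'not values or "avg" not in values' is exactly 'get? = none' on the values dict.
def evaluate_metric (metric_name : String) (values : List (String × Int)) (thresholds : List (String × Int)) : String :=
  match PySem.Dict.get? (PySem.Dict.mk values) "avg" with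
  | none => "SKIP"
  | some avg_val =>
    match PySem.Dict.get? (PySem.Dict.mk thresholds) metric_name with
    | some t => if avg_val ≤ t then "PASS" else "FAIL"
    | none => "SKIP"

def evaluate_scenario (scenario_data : List (String × List (String × List (String × Int)))) (thresholds : List (String × Int)) : (List (String × String)) × String :=
  -- scenario_data["metrics"] (total form: Pre_ excludes the KeyError case get? = none)
  let ms := (PySem.Dict.get? (PySem.Dict.mk scenario_data) "metrics").getD []
  let r := ms.foldl (fun acc p =>
      let status := evaluate_metric p.1 p.2 thresholds
      let results := acc.1.insert p.1 status
      if status == "FAIL" then (results, "FAIL", acc.2.2.1, true)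
      else if status == "SKIP" then (results, acc.2.1, true, acc.2.2.2)
      else (results, acc.2.1, acc.2.2.1, acc.2.2.2))
    ((PySem.Dict.empty : PySem.Dict String String), "PASS", false, false)
  let results := r.1
  let scenario_status := r.2.1
  let found_skip := r.2.2.1
  let found_fail := r.2.2.2
  let scenario_status := if !found_fail && found_skip && (scenario_status == "PASS") then "MIXED" else scenario_status
  let scenario_status := if results.values.all (fun v => v == "SKIP") then "SKIP" else scenario_status
  (results.items, scenario_status)

-- ===== PORT B =====
-- _join: FAIL absorbs, unequal non-FAIL statuses join to MIXED; none is the identity.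
def status_join (a : Option String) (s : String) : Option String :=
  match a with
  | none => some s
  | some a => if a == "FAIL" || s == "FAIL" then some "FAIL"
              else if a != s then some "MIXED"
              else some a

def evaluate_scenario_alt (scenario_data : List (String × List (String × List (String × Int)))) (thresholds : List (String × Int)) : (List (String × String)) × String :=
  let ms := (PySem.Dict.get? (PySem.Dict.mk scenario_data) "metrics").getD []
  let r := ms.foldl (fun acc p =>
      let status := evaluate_metric p.1 p.2 thresholds
      (acc.1.insert p.1 status, status_join acc.2 status))
    ((PySem.Dict.empty : PySem.Dict String String), (none : Option String))
  (r.1.items, r.2.getD "SKIP")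

-- ===== PRECONDITION & SPEC =====
-- Pre_ excludes inputs whose scenario_data has no "metrics" key (A raises KeyError there) and
-- association lists with duplicate keys at any dict level (a Python dict never has duplicate
-- keys, so such lists are artefacts of the encoding).
def Pre_evaluate_scenario (scenario_data : List (String × List (String × List (String × Int)))) (thresholds : List (String × Int)) : Prop :=
  (PySem.Dict.get? (PySem.Dict.mk scenario_data) "metrics").isSome = true ∧
  (scenario_data.map Prod.fst).Nodup ∧
  (∀ p ∈ scenario_data, (p.2.map Prod.fst).Nodup ∧ ∀ q ∈ p.2, (q.2.map Prod.fst).Nodup) ∧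
  (thresholds.map Prod.fst).Nodup
instance (scenario_data : List (String × List (String × List (String × Int)))) (thresholds : List (String × Int)) : Decidable (Pre_evaluate_scenario scenario_data thresholds) := by unfold Pre_evaluate_scenario; infer_instance

def pvWitness_evaluate_scenario : (List (String × List (String × List (String × Int)))) × (List (String × Int)) :=
  ([("metrics", [("temp", [("avg", 5)]), ("volt", [])])], [("temp", 10)])

def Spec_evaluate_scenario (scenario_data : List (String × List (String × List (String × Int)))) (thresholds : List (String × Int)) (out : (List (String × String)) × String) : Prop := out = evaluate_scenario_alt scenario_data thresholds
instance (scenario_data : List (String × List (String × List (String × Int)))) (thresholds : List (String × Int)) (out : (List (String × String)) × String) : Decidable (Spec_evaluate_scenario scenario_data thresholds out) := by unfold Spec_evaluate_scenario; infer_instance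

-- ===== CLAIM (what is proved, stated in full; the proofs are below) =====
def Claim_equal_evaluate_scenario : Prop := ∀ (scenario_data : List (String × List (String × List (String × Int)))) (thresholds : List (String × Int)), Dom_evaluate_scenario scenario_data thresholds → Pre_evaluate_scenario scenario_data thresholds → Spec_evaluate_scenario scenario_data thresholds (evaluate_scenario scenario_data thresholds)

-- ===== LEMMAS AND PROOFS =====

-- A's loop, characterised: results is an insert-fold, the status is FAIL iff some metric FAILs
-- (else unchanged), and the flags record any-SKIP / any-FAIL.
theorem loopA_eq (thresholds : List (String × Int)) (ms : List (String × List (String × Int)))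
    (d : PySem.Dict String String) (st : String) (fs ff : Bool) :
    ms.foldl (fun acc p =>
      let status := evaluate_metric p.1 p.2 thresholds
      let results := acc.1.insert p.1 status
      if status == "FAIL" then (results, "FAIL", acc.2.2.1, true)
      else if status == "SKIP" then (results, acc.2.1, true, acc.2.2.2)
      else (results, acc.2.1, acc.2.2.1, acc.2.2.2)) (d, st, fs, ff)
    = (ms.foldl (fun d p => d.insert p.1 (evaluate_metric p.1 p.2 thresholds)) d,
       (if ms.any (fun p => evaluate_metric p.1 p.2 thresholds == "FAIL") then "FAIL" else st),
       fs || ms.any (fun p => evaluate_metric p.1 p.2 thresholds == "SKIP"),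
       ff || ms.any (fun p => evaluate_metric p.1 p.2 thresholds == "FAIL")) := by
  induction ms generalizing d st fs ff with
  | nil => simp
  | cons p rest ih =>
    simp only [List.foldl_cons, List.any_cons]
    by_cases hF : (evaluate_metric p.1 p.2 thresholds == "FAIL") = true
    · have hS0 : (evaluate_metric p.1 p.2 thresholds == "SKIP") = false := by
        rw [beq_iff_eq.mp hF]; decide
      simp only [hF]
      rw [ih]; simp [hS0]
    · have hF' := Bool.eq_false_iff.mpr (fun h => hF h)
      by_cases hS : (evaluate_metric p.1 p.2 thresholds == "SKIP") = true
      · simp only [hF', Bool.false_eq_true, if_false, hS]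
        rw [ih]; simp
        rw [Bool.false_or]
      · have hS' := Bool.eq_false_iff.mpr (fun h => hS h)
        simp only [hF', hS', Bool.false_eq_true, if_false]
        rw [ih]; simp
        rw [Bool.false_or]

-- B's loop splits into the same insert-fold plus a join-fold over the status list.
theorem loopB_eq (thresholds : List (String × Int)) (ms : List (String × List (String × Int)))
    (d : PySem.Dict String String) (a : Option String) :
    ms.foldl (fun acc p =>
      let status := evaluate_metric p.1 p.2 thresholds
      (acc.1.insert p.1 status, status_join acc.2 status)) (d, a)
    = (ms.foldl (fun d p => d.insert p.1 (evaluate_metric p.1 p.2 thresholds)) d,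
       (ms.map (fun p => evaluate_metric p.1 p.2 thresholds)).foldl status_join a) := by
  induction ms generalizing d a with
  | nil => simp
  | cons p rest ih => simp [ih]

theorem evaluate_metric_valid (m : String) (v : List (String × Int)) (th : List (String × Int)) :
    evaluate_metric m v th = "PASS" ∨ evaluate_metric m v th = "FAIL" ∨ evaluate_metric m v th = "SKIP" := by
  unfold evaluate_metric
  rcases PySem.Dict.get? (PySem.Dict.mk v) "avg" with _ | av
  · simp
  · rcases PySem.Dict.get? (PySem.Dict.mk th) m with _ | t
    · simp
    · by_cases h : av ≤ t <;> simp [h]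

theorem fold_fail (l : List String) :
    l.foldl status_join (some "FAIL") = some "FAIL" := by
  induction l with
  | nil => rfl
  | cons s rest ih => simp [status_join, ih]

theorem fold_mixed (l : List String)
    (hl : ∀ s ∈ l, s = "PASS" ∨ s = "FAIL" ∨ s = "SKIP") :
    l.foldl status_join (some "MIXED")
    = (if l.any (fun s => s == "FAIL") then some "FAIL" else some "MIXED") := by
  induction l with
  | nil => rfl
  | cons s rest ih =>
    rcases hl s (by simp) with h | h | h <;> subst h <;>
      simp [status_join, fold_fail, ih (fun x hx => hl x (List.mem_cons_of_mem _ hx))]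

theorem fold_pass (l : List String)
    (hl : ∀ s ∈ l, s = "PASS" ∨ s = "FAIL" ∨ s = "SKIP") :
    l.foldl status_join (some "PASS")
    = (if l.any (fun s => s == "FAIL") then some "FAIL"
       else if l.any (fun s => s == "SKIP") then some "MIXED" else some "PASS") := by
  induction l with
  | nil => rfl
  | cons s rest ih =>
    have hrest := fun x hx => hl x (List.mem_cons_of_mem _ hx)
    rcases hl s (by simp) with h | h | h <;> subst h <;>
      simp [status_join, fold_fail, fold_mixed rest hrest, ih hrest]

theorem fold_skip (l : List String)
    (hl : ∀ s ∈ l, s = "PASS" ∨ s = "FAIL" ∨ s = "SKIP") :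
    l.foldl status_join (some "SKIP")
    = (if l.any (fun s => s == "FAIL") then some "FAIL"
       else if l.all (fun s => s == "SKIP") then some "SKIP" else some "MIXED") := by
  induction l with
  | nil => rfl
  | cons s rest ih =>
    have hrest := fun x hx => hl x (List.mem_cons_of_mem _ hx)
    rcases hl s (by simp) with h | h | h <;> subst h <;>
      simp [status_join, fold_fail, fold_mixed rest hrest, ih hrest]

theorem all_skip_false_of_any_fail {A : Type} (l : List A) (f : A → String)
    (h : l.any (fun x => f x == "FAIL") = true) :
    l.all (fun x => f x == "SKIP") = false := by
  rcases List.any_eq_true.mp h with ⟨x, hx, hxF⟩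
  refine Bool.eq_false_iff.mpr (fun hall => ?_)
  have hxS := List.all_eq_true.mp hall x hx
  rw [beq_iff_eq.mp hxF] at hxS
  exact absurd hxS (by decide)

-- B's join-fold yields exactly the precedence cascade.
theorem joinFold_eq (l : List String)
    (hl : ∀ s ∈ l, s = "PASS" ∨ s = "FAIL" ∨ s = "SKIP") :
    (l.foldl status_join none).getD "SKIP"
    = (if l.all (fun s => s == "SKIP") then "SKIP"
       else if l.any (fun s => s == "FAIL") then "FAIL"
       else if l.any (fun s => s == "SKIP") then "MIXED" else "PASS") := by
  cases l with
  | nil => rfl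
  | cons s rest =>
    have hrest := fun x hx => hl x (List.mem_cons_of_mem _ hx)
    simp only [List.foldl_cons, List.all_cons, List.any_cons, status_join]
    rcases hl s (by simp) with h | h | h <;> subst h
    · rw [fold_pass rest hrest]
      by_cases hF : rest.any (fun s => s == "FAIL") = true
      · simp [hF]
      · simp only [Bool.not_eq_true] at hF
        by_cases hS : rest.any (fun s => s == "SKIP") = true <;> simp [hF, hS]
    · rw [fold_fail]
      simp
    · rw [fold_skip rest hrest]
      by_cases hF : rest.any (fun s => s == "FAIL") = true
      · have hA : rest.all (fun s => s == "SKIP") = false := by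
          simpa using all_skip_false_of_any_fail rest id (by simpa using hF)
        simp [hF, hA]
      · simp only [Bool.not_eq_true] at hF
        by_cases hAll : rest.all (fun s => s == "SKIP") = true <;> simp [hF, hAll]

-- A's flag-and-correction status computation equals the same cascade, for any flags with
-- 'any FAIL implies not all SKIP'.
theorem cascade_eq (aF aS al : Bool) (hc : aF = true → al = false) :
    (if al = true then "SKIP"
     else if (!aF && aS && ((if aF = true then "FAIL" else "PASS") == "PASS")) = true then "MIXED"
     else if aF = true then "FAIL" else "PASS")
    = (if al = true then "SKIP"
       else if aF = true then "FAIL"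
       else if aS = true then "MIXED" else "PASS") := by
  cases aF <;> cases aS <;> cases al <;> simp_all

-- ===== VERDICT (by name: the statement is the Claim_ definition above) =====
theorem evaluate_scenario_spec : Claim_equal_evaluate_scenario := by
  intro sd th _hdom hpre
  obtain ⟨hsome, _hnd, hinner, _hth⟩ := hpre
  unfold Spec_evaluate_scenario evaluate_scenario evaluate_scenario_alt
  obtain ⟨ms, hms⟩ := Option.isSome_iff_exists.mp hsome
  have hmem : ("metrics", ms) ∈ sd := PySem.Dict.mem_items_of_get?_eq_some (PySem.Dict.mk sd) hms
  have hndms : (ms.map Prod.fst).Nodup := (hinner _ hmem).1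
  have hvals : (List.foldl (fun (d : PySem.Dict String String) p => d.insert p.1 (evaluate_metric p.1 p.2 th)) PySem.Dict.empty ms).values
      = ms.map (fun p => evaluate_metric p.1 p.2 th) := by
    have hitems := PySem.Dict.items_foldl_insert_fresh ms Prod.fst (fun p => evaluate_metric p.1 p.2 th)
      PySem.Dict.empty (fun a _ => PySem.Dict.contains_empty _) hndms
    simp only at hitems
    unfold PySem.Dict.values
    rw [hitems]
    simp [PySem.Dict.empty]
  have hvalid : ∀ s ∈ ms.map (fun p => evaluate_metric p.1 p.2 th),
      s = "PASS" ∨ s = "FAIL" ∨ s = "SKIP" := by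
    intro s hs
    rcases List.mem_map.mp hs with ⟨p, _, hp⟩
    rw [← hp]; exact evaluate_metric_valid p.1 p.2 th
  simp only [hms, Option.getD_some, loopA_eq, loopB_eq, Bool.false_or, hvals,
    List.all_map, Prod.mk.injEq]
  refine ⟨trivial, ?_⟩
  rw [joinFold_eq _ hvalid]
  simp only [List.all_map, List.any_map]
  exact cascade_eq _ _ _ (fun h => all_skip_false_of_any_fail ms _ h)
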